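-- pv_equiv track=rewrite | github.com/marvin939/projecteuler-python | problem 5 - smallest multiple/DonDark44.py | check
-- ===== SOURCE A (Python) =====
-- def check(n):
--     m=0
--     for i in range(1,21,1):
--         if n%i==0:
--             m+=1
--     if m==20:
--         return True
--     else:
--         return False
-- ===== SOURCE B (Python) =====
-- def check(n):
--     # divisible by all of 1..20  <=>  divisible by lcm(1..20) = 232792560
--     return n % 232792560 == 0
-- ===== Notes on version B (the rewrite author's own statement) =====
-- stated objective: simpler
-- what changed: Replaced the 20-iteration divisor-counting loop with a single modulo test against lcm(1..20)=232792560.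
import Mathlib
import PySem

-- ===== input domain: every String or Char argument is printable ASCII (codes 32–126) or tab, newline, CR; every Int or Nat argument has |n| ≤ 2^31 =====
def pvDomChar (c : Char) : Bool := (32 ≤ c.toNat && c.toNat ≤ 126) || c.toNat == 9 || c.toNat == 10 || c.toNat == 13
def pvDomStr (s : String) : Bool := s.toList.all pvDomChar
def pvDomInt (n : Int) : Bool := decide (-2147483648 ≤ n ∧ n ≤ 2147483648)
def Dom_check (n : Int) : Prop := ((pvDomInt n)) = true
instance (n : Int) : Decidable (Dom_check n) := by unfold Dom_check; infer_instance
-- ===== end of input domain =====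

-- B replaces A's 20-iteration divisor-counting loop by one modulo test against lcm(1..20); objective: simpler.

-- ===== PORT A =====
def check (n : Int) : Bool :=
  let m : Int := (PySem.List.pyRange 1 21 1).foldl
    (fun m i => if PySem.Int.mod n i = 0 then m + 1 else m) 0
  if m = 20 then true else false

-- ===== PORT B =====
def check_alt (n : Int) : Bool := PySem.Int.mod n 232792560 = 0

-- ===== PRECONDITION & SPEC =====
def Spec_check (n : Int) (out : Bool) : Prop := out = check_alt n
instance (n : Int) (out : Bool) : Decidable (Spec_check n out) := by unfold Spec_check; infer_instance

-- ===== CLAIM (what is proved, stated in full; the proofs are below) =====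
def Claim_equal_check : Prop := ∀ (n : Int), Dom_check n → Spec_check n (check n)

-- ===== LEMMAS AND PROOFS =====

-- the counting loop is List.countP
theorem foldl_count (p : Int → Prop) [DecidablePred p] (l : List Int) (c : Int) :
    l.foldl (fun m i => if p i then m + 1 else m) c
      = c + (l.countP (fun i => decide (p i)) : Int) := by
  induction l generalizing c with
  | nil => simp
  | cons a t ih =>
      by_cases h : p a <;> simp [List.foldl, h, ih] <;> push_cast <;> ring

theorem range_lit : PySem.List.pyRange 1 21 1 =
    [1,2,3,4,5,6,7,8,9,10,11,12,13,14,15,16,17,18,19,20] := by decide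

theorem all_dvd_iff (n : Int) :
    (∀ i ∈ [(1:Int),2,3,4,5,6,7,8,9,10,11,12,13,14,15,16,17,18,19,20], i ∣ n) ↔
      (232792560 : Int) ∣ n := by
  constructor
  · intro h
    have h16 := h 16 (by decide)
    have h9 := h 9 (by decide)
    have h5 := h 5 (by decide)
    have h7 := h 7 (by decide)
    have h11 := h 11 (by decide)
    have h13 := h 13 (by decide)
    have h17 := h 17 (by decide)
    have h19 := h 19 (by decide)
    have c1 : IsCoprime (16 : Int) 9 := by
      rw [Int.isCoprime_iff_gcd_eq_one]; decide
    have c2 : IsCoprime (144 : Int) 5 := by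
      rw [Int.isCoprime_iff_gcd_eq_one]; decide
    have c3 : IsCoprime (720 : Int) 7 := by
      rw [Int.isCoprime_iff_gcd_eq_one]; decide
    have c4 : IsCoprime (5040 : Int) 11 := by
      rw [Int.isCoprime_iff_gcd_eq_one]; decide
    have c5 : IsCoprime (55440 : Int) 13 := by
      rw [Int.isCoprime_iff_gcd_eq_one]; decide
    have c6 : IsCoprime (720720 : Int) 17 := by
      rw [Int.isCoprime_iff_gcd_eq_one]; decide
    have c7 : IsCoprime (12252240 : Int) 19 := by
      rw [Int.isCoprime_iff_gcd_eq_one]; decide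
    have s1 : (144 : Int) ∣ n := by have := c1.mul_dvd h16 h9; norm_num at this; exact this
    have s2 : (720 : Int) ∣ n := by have := c2.mul_dvd s1 h5; norm_num at this; exact this
    have s3 : (5040 : Int) ∣ n := by have := c3.mul_dvd s2 h7; norm_num at this; exact this
    have s4 : (55440 : Int) ∣ n := by have := c4.mul_dvd s3 h11; norm_num at this; exact this
    have s5 : (720720 : Int) ∣ n := by have := c5.mul_dvd s4 h13; norm_num at this; exact this
    have s6 : (12252240 : Int) ∣ n := by have := c6.mul_dvd s5 h17; norm_num at this; exact this
    have s7 : (232792560 : Int) ∣ n := by have := c7.mul_dvd s6 h19; norm_num at this; exact this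
    exact s7
  · intro h i hi
    have hd : i ∣ (232792560 : Int) := by fin_cases hi <;> decide
    exact hd.trans h

-- ===== VERDICT (by name: the statement is the Claim_ definition above) =====
theorem check_spec : Claim_equal_check := by
  intro n _
  unfold Spec_check check check_alt
  rw [range_lit, foldl_count (fun i => PySem.Int.mod n i = 0)]
  set l : List Int := [1,2,3,4,5,6,7,8,9,10,11,12,13,14,15,16,17,18,19,20] with hl
  have hlen : (l.countP (fun i => decide (PySem.Int.mod n i = 0)) = 20)
      ↔ (∀ i ∈ l, PySem.Int.mod n i = 0) := by
    constructor
    · intro h i hi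
      have := List.countP_eq_length.mp (by simp [hl] at h ⊢; omega) i hi
      simpa using this
    · intro h
      have := List.countP_eq_length.mpr (fun i hi => decide_eq_true (h i hi))
      simp [hl] at this ⊢; omega
  by_cases hall : (232792560 : Int) ∣ n
  · have hc : ∀ i ∈ l, PySem.Int.mod n i = 0 := fun i hi =>
      (PySem.Int.mod_eq_zero_iff_dvd n i).mpr ((all_dvd_iff n).mpr hall i hi)
    have hm : PySem.Int.mod n 232792560 = 0 :=
      (PySem.Int.mod_eq_zero_iff_dvd n _).mpr hall
    have h20 := hlen.mpr hc
    simp [h20]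
    exact hall
  · have hnc : ¬ (l.countP (fun i => decide (PySem.Int.mod n i = 0)) = 20) := fun h =>
      hall ((all_dvd_iff n).mp (fun i hi =>
        (PySem.Int.mod_eq_zero_iff_dvd n i).mp (hlen.mp h i hi)))
    have hm : ¬ PySem.Int.mod n 232792560 = 0 := fun h =>
      hall ((PySem.Int.mod_eq_zero_iff_dvd n _).mp h)
    have hne : ¬ ((l.countP (fun i => decide (PySem.Int.mod n i = 0)) : Int) = 20) := by
      intro h; exact hnc (by omega)
    simp [hne]
    exact hall
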